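-- pv_equiv track=rewrite | github.com/0fflineDocs/KQL | convert.py | convert_kql_to_md
-- ===== SOURCE A (Python) =====
-- def get_title_from_filename(filename):
--     name = filename.replace('.kql', '').replace('-', ' ').replace('_', ' ').replace('&', 'and')
--     return name
--
-- def convert_kql_to_md(content, filename):
--     title = get_title_from_filename(filename)
--     lines = content.split('\n')
--     result = [f"# {title}\n"]
--     i = 0
--     while i < len(lines):
--         line = lines[i]
--         if line.strip().startswith('//'):
--             comment = line.strip()[2:].strip()
--             if comment:
--                 result.append(f"\n## {comment}\n")
--             i += 1
--             query_lines = []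
--             while i < len(lines) and not lines[i].strip().startswith('//'):
--                 query_lines.append(lines[i])
--                 i += 1
--             while query_lines and not query_lines[-1].strip():
--                 query_lines.pop()
--             if any(line.strip() for line in query_lines):
--                 result.append("```kql")
--                 result.extend(query_lines)
--                 result.append("```\n")
--         else:
--             if line.strip():
--                 query_lines = []
--                 while i < len(lines) and not lines[i].strip().startswith('//'):
--                     query_lines.append(lines[i])
--                     i += 1
--                 while query_lines and not query_lines[-1].strip():
--                     query_lines.pop()
--                 if any(line.strip() for line in query_lines):
--                     result.append("```kql")
--                     result.extend(query_lines)
--                     result.append("```\n")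
--             else:
--                 i += 1
--     return '\n'.join(result)
-- ===== SOURCE B (Python) =====
-- def get_title_from_filename(filename):
--     name = filename.replace('.kql', '').replace('-', ' ').replace('_', ' ').replace('&', 'and')
--     return name
--
-- def convert_kql_to_md(content, filename):
--     title = get_title_from_filename(filename)
--     lines = content.split('\n')
--     while lines and not lines[0].strip():
--         lines.pop(0)
--     result = [f"# {title}\n"]
--     buf = []
--
--     def flush():
--         while buf and not buf[-1].strip():
--             buf.pop()
--         if buf:
--             result.append("```kql")
--             result.extend(buf)
--             result.append("```\n")
--         buf.clear()
--
--     for line in lines: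
--         stripped = line.strip()
--         if stripped.startswith('//'):
--             flush()
--             comment = stripped[2:].strip()
--             if comment:
--                 result.append(f"\n## {comment}\n")
--         else:
--             buf.append(line)
--     flush()
--     return '\n'.join(result)
-- ===== Notes on version B (the rewrite author's own statement) =====
-- stated objective: simpler
-- what changed: Replaces A's index-driven while loop with two duplicated nested collect-then-pop block scans by a single forward for-pass that strips leading blank lines once and maintains a query buffer with one flush helper.
import Mathlib
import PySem

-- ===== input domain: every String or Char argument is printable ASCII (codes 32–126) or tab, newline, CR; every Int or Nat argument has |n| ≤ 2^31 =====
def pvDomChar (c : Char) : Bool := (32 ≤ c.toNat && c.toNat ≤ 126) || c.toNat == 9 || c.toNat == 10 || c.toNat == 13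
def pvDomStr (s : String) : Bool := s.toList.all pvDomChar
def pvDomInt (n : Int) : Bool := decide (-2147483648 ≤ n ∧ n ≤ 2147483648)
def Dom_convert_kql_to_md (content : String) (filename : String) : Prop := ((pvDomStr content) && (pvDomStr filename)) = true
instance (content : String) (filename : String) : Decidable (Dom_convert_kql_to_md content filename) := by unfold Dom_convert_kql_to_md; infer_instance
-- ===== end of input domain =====

-- B rewrites A's index-driven while loop with duplicated nested block scans as one
-- forward pass over the lines with a query buffer and a single flush helper (objective: simpler).

-- ===== PORT A =====

-- shared by both ports: line.strip() == '' and line.strip().startswith('//')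
def pvBlank (l : String) : Bool := PySem.Str.strip l == ""
def pvIsComment (l : String) : Bool := PySem.Str.startswith (PySem.Str.strip l) "//"

-- filename.replace('.kql','').replace('-',' ').replace('_',' ').replace('&','and')
def get_title_from_filename (filename : String) : String :=
  PySem.Str.replace (PySem.Str.replace (PySem.Str.replace
    (PySem.Str.replace filename ".kql" "") "-" " ") "_" " ") "&" "and"

-- the inner 'while i < len(lines) and not lines[i].strip().startswith("//")' collector:
-- returns (collected query lines, remaining lines)
def pvTakeQueryA : List String → List String × List String
  | [] => ([], [])
  | l :: ls =>
    if pvIsComment l then ([], l :: ls)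
    else
      let r := pvTakeQueryA ls
      (l :: r.1, r.2)

-- termination fact for the main loop below
theorem pvTakeQueryA_snd_length (ls : List String) :
    (pvTakeQueryA ls).2.length ≤ ls.length := by
  induction ls with
  | nil => simp [pvTakeQueryA]
  | cons l ls ih =>
    by_cases h : pvIsComment l
    · simp [pvTakeQueryA, h]
    · simp [pvTakeQueryA, h]
      omega

-- 'while query_lines and not query_lines[-1].strip(): query_lines.pop()'
def pvPopTrailA : List String → List String
  | [] => []
  | x :: xs =>
    match pvPopTrailA xs with
    | [] => if pvBlank x then [] else [x]
    | r => x :: r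

-- pop trailing blanks, then the 'if any(line.strip() …)' guarded code fence
def pvBlockA (q : List String) : List String :=
  let q' := pvPopTrailA q
  if q'.any (fun l => !(pvBlank l)) then ["```kql"] ++ q' ++ ["```\n"] else []

-- the 'while i < len(lines)' loop, producing the lines appended after the title
def pvLoopA : List String → List String
  | [] => []
  | l :: rest =>
    if pvIsComment l then
      let comment := PySem.Str.strip (PySem.Str.slice (PySem.Str.strip l) (some 2) none)
      let hdr := if comment ≠ "" then ["\n## " ++ comment ++ "\n"] else []
      let p := pvTakeQueryA rest
      hdr ++ pvBlockA p.1 ++ pvLoopA p.2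
    else
      if !(pvBlank l) then
        let p := pvTakeQueryA (l :: rest)
        pvBlockA p.1 ++ pvLoopA p.2
      else pvLoopA rest
termination_by ls => ls.length
decreasing_by
  · have := pvTakeQueryA_snd_length rest; simp; omega
  · rename_i h _
    simp only [pvTakeQueryA, h, if_neg, Bool.false_eq_true, not_false_eq_true]
    have := pvTakeQueryA_snd_length rest
    simp; omega
  · simp

def convert_kql_to_md (content : String) (filename : String) : String :=
  let title := get_title_from_filename filename
  let lines := (PySem.Str.split? content "\n").getD []
  PySem.Str.join "\n" (("# " ++ title ++ "\n") :: pvLoopA lines)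

-- ===== PORT B =====

-- 'while lines and not lines[0].strip(): lines.pop(0)'
def pvDropLeadB : List String → List String
  | [] => []
  | l :: ls => if pvBlank l then pvDropLeadB ls else l :: ls

-- flush(): pop trailing blanks off the buffer …
def pvPopTrailB : List String → List String
  | [] => []
  | x :: xs =>
    match pvPopTrailB xs with
    | [] => if pvBlank x then [] else [x]
    | r => x :: r

-- … then 'if buf:' emit the code fence
def pvFlushB (buf : List String) : List String :=
  let q := pvPopTrailB buf
  if q.isEmpty then [] else ["```kql"] ++ q ++ ["```\n"]

-- the 'for line in lines' pass carrying the buffer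
def pvLoopB : List String → List String → List String
  | buf, [] => pvFlushB buf
  | buf, l :: ls =>
    let s := PySem.Str.strip l
    if PySem.Str.startswith s "//" then
      let comment := PySem.Str.strip (PySem.Str.slice s (some 2) none)
      pvFlushB buf ++ (if comment ≠ "" then ["\n## " ++ comment ++ "\n"] else []) ++ pvLoopB [] ls
    else pvLoopB (buf ++ [l]) ls

def convert_kql_to_md_alt (content : String) (filename : String) : String :=
  let title := get_title_from_filename filename
  let lines := pvDropLeadB ((PySem.Str.split? content "\n").getD [])
  PySem.Str.join "\n" (("# " ++ title ++ "\n") :: pvLoopB [] lines)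

-- ===== PRECONDITION & SPEC =====
def Spec_convert_kql_to_md (content : String) (filename : String) (out : String) : Prop := out = convert_kql_to_md_alt content filename
instance (content : String) (filename : String) (out : String) : Decidable (Spec_convert_kql_to_md content filename out) := by unfold Spec_convert_kql_to_md; infer_instance

-- ===== CLAIM (what is proved, stated in full; the proofs are below) =====
def Claim_equal_convert_kql_to_md : Prop := ∀ (content : String) (filename : String), Dom_convert_kql_to_md content filename → Spec_convert_kql_to_md content filename (convert_kql_to_md content filename)

-- ===== LEMMAS AND PROOFS =====

theorem pvPopTrailB_eq (q : List String) : pvPopTrailB q = pvPopTrailA q := by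
  induction q with
  | nil => rfl
  | cons x xs ih => simp [pvPopTrailA, pvPopTrailB, ih]

-- after popping trailing blanks, the list is nonempty iff it contains a nonblank line
theorem pvPopTrailA_any (q : List String) :
    (pvPopTrailA q).any (fun l => !(pvBlank l)) = !(pvPopTrailA q).isEmpty := by
  induction q with
  | nil => rfl
  | cons x xs ih =>
    simp only [pvPopTrailA]
    cases h : pvPopTrailA xs with
    | nil =>
      by_cases hb : pvBlank x <;> simp [hb]
    | cons y ys =>
      rw [h] at ih
      simp only [List.any_cons, ih]
      simp

theorem pvFlushB_eq_block (q : List String) : pvFlushB q = pvBlockA q := by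
  simp only [pvFlushB, pvBlockA, pvPopTrailB_eq, pvPopTrailA_any]
  cases (pvPopTrailA q).isEmpty <;> simp

theorem pvFlushB_nil : pvFlushB [] = [] := rfl

theorem pvBlockA_nil : pvBlockA [] = [] := rfl

-- main loop correspondence: the running buffer plus the lines A's inner scan would
-- still collect make one block, flushed before what follows
theorem pvLoopB_eq (ls : List String) : ∀ buf : List String,
    pvLoopB buf ls = pvFlushB (buf ++ (pvTakeQueryA ls).1) ++ pvLoopA (pvTakeQueryA ls).2 := by
  induction ls with
  | nil => intro buf; simp [pvLoopB, pvTakeQueryA, pvLoopA]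
  | cons l rest ih =>
    intro buf
    by_cases h : pvIsComment l
    · have hs : PySem.Str.startswith (PySem.Str.strip l) "//" = true := h
      have key := ih []
      rw [List.nil_append] at key
      simp only [pvLoopB, hs, if_true, key, pvTakeQueryA, h, List.append_nil]
      rw [pvLoopA]
      simp only [h, if_true]
      simp [pvFlushB_eq_block, List.append_assoc]
    · have hs : PySem.Str.startswith (PySem.Str.strip l) "//" = false := by
        simpa [pvIsComment] using h
      simp only [pvLoopB, hs, Bool.false_eq_true, if_false]
      rw [ih (buf ++ [l])]
      simp [pvTakeQueryA, h, List.append_assoc]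

-- a blank line is not a comment line
theorem pvBlank_not_comment {l : String} (h : pvBlank l = true) : pvIsComment l = false := by
  unfold pvBlank at h
  unfold pvIsComment
  rw [eq_of_beq h]
  decide

-- A skips leading blank lines
theorem pvLoopA_dropLead (ls : List String) : pvLoopA ls = pvLoopA (pvDropLeadB ls) := by
  induction ls with
  | nil => rfl
  | cons l rest ih =>
    by_cases hb : pvBlank l
    · rw [pvLoopA]
      simp [pvBlank_not_comment hb, hb, pvDropLeadB, ih]
    · simp [pvDropLeadB, hb]

-- on a list with no leading blank line the two loops agree
set_option maxHeartbeats 1000000 in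
theorem pvLoopA_eq_loopB (ls : List String)
    (hclean : ls = [] ∨ ∃ l rest, ls = l :: rest ∧ pvBlank l = false) :
    pvLoopA ls = pvLoopB [] ls := by
  rcases hclean with h | ⟨l, rest, rfl, hb⟩
  · subst h; simp [pvLoopA, pvLoopB, pvFlushB_nil]
  · by_cases hc : pvIsComment l
    · have hs : PySem.Str.startswith (PySem.Str.strip l) "//" = true := hc
      have key := pvLoopB_eq rest []
      rw [List.nil_append] at key
      rw [pvLoopA]
      simp only [hc, if_true, pvLoopB, hs, key, pvFlushB_eq_block, pvBlockA_nil,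
        List.nil_append, List.append_assoc]
    · have hs : PySem.Str.startswith (PySem.Str.strip l) "//" = false := by
        simpa [pvIsComment] using hc
      have key := pvLoopB_eq rest [l]
      rw [pvLoopA]
      simp only [hc, Bool.false_eq_true, if_false, hb, Bool.not_false, if_true,
        pvLoopB, hs, List.nil_append, key]
      simp [pvTakeQueryA, hc, pvFlushB_eq_block]

theorem pvDropLeadB_clean (ls : List String) :
    pvDropLeadB ls = [] ∨ ∃ l rest, pvDropLeadB ls = l :: rest ∧ pvBlank l = false := by
  induction ls with
  | nil => left; rfl
  | cons l rest ih =>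
    by_cases hb : pvBlank l
    · simpa [pvDropLeadB, hb] using ih
    · right; exact ⟨l, rest, by simp [pvDropLeadB, hb], by simpa using hb⟩

-- ===== VERDICT (by name: the statement is the Claim_ definition above) =====
theorem convert_kql_to_md_spec : Claim_equal_convert_kql_to_md := by
  intro content filename _
  unfold Spec_convert_kql_to_md convert_kql_to_md convert_kql_to_md_alt
  have key : pvLoopA ((PySem.Str.split? content "\n").getD []) =
      pvLoopB [] (pvDropLeadB ((PySem.Str.split? content "\n").getD [])) := by
    rw [pvLoopA_dropLead]
    have h := pvDropLeadB_clean ((PySem.Str.split? content "\n").getD [])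
    rcases h with h | ⟨l, rest, heq, hb⟩
    · rw [h]; exact pvLoopA_eq_loopB [] (Or.inl rfl)
    · rw [heq]; exact pvLoopA_eq_loopB (l :: rest) (Or.inr ⟨l, rest, rfl, hb⟩)
  exact congrArg (fun x => PySem.Str.join "\n"
    (("# " ++ get_title_from_filename filename ++ "\n") :: x)) key
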